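-- pv_equiv track=rewrite | github.com/ng3rdstmadgke/CodeKata | root_rationalization.py | root_result
-- ===== SOURCE A (Python) =====
-- def root_result(pf_num_list):
--     f_num = 1
--     b_num = 1
--     for i in range(len(pf_num_list)):
--         if pf_num_list[i][1] % 2 == 1:
--             b_num *= pf_num_list[i][0]
--         if pf_num_list[i][1] >= 2:
--             n = pf_num_list[i][0] ** (pf_num_list[i][1] // 2)
--             f_num *= n
--
--     return [f_num, b_num]
-- ===== SOURCE B (Python) =====
-- def root_result(pf_num_list):
--     def solve(pairs):
--         if not pairs:
--             return (1, 1)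
--         if len(pairs) == 1:
--             base, exp = pairs[0]
--             q, r = divmod(exp, 2)
--             return (base ** q if q >= 1 else 1, base if r == 1 else 1)
--         mid = len(pairs) // 2
--         f1, b1 = solve(pairs[:mid])
--         f2, b2 = solve(pairs[mid:])
--         return (f1 * f2, b1 * b2)
--     f_num, b_num = solve(pf_num_list)
--     return [f_num, b_num]
-- ===== Notes on version B (the rewrite author's own statement) =====
-- stated objective: alternative
-- what changed: Replaces A's linear indexed loop with two running accumulators by a balanced divide-and-conquer: the list is split in half recursively, leaves compute their (coefficient, radicand) contribution from one divmod(exp, 2), and subtree results are combined by componentwise multiplication (tree product instead of left fold).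
import Mathlib
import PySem

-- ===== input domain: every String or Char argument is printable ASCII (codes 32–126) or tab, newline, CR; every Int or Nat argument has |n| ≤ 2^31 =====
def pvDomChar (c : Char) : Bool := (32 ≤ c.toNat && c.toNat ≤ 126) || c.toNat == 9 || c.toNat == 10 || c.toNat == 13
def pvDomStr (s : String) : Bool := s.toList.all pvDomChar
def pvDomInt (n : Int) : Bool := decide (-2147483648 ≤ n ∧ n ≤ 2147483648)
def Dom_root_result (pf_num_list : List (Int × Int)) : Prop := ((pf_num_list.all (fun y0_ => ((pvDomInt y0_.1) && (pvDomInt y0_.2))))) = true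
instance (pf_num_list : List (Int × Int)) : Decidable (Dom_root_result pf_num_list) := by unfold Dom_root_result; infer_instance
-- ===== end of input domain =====

-- B replaces A's linear indexed loop by a balanced divide-and-conquer tree product
-- with a divmod(exp, 2) leaf (alternative algorithm, same cost).


-- ===== PORT A =====
-- 'for i in range(len(...))' with indexing, one loop body per pair; '**' has a nonnegative
-- exponent (exp // 2 >= 1 under the guard 'exp >= 2'), so '^ (…).toNat' is exact there
def pvStepA (acc : Int × Int) (p : Int × Int) : Int × Int :=
  let b_num := if PySem.Int.mod p.2 2 = 1 then acc.2 * p.1 else acc.2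
  let f_num := if p.2 ≥ 2 then acc.1 * (p.1 ^ (PySem.Int.floordiv p.2 2).toNat) else acc.1
  (f_num, b_num)

def root_result (pf_num_list : List (Int × Int)) : List Int :=
  let st := (PySem.List.pyRange 0 (PySem.List.len pf_num_list) 1).foldl
    (fun acc i => pvStepA acc (PySem.List.pyGetD pf_num_list i (0, 0))) (1, 1)
  [st.1, st.2]

-- ===== PORT B =====
-- solve: empty and singleton leaves, else split at mid = len // 2 into pairs[:mid] / pairs[mid:]
-- (mid is nonnegative and in range, so the Python slices are exactly take/drop); the leaf's
-- 'divmod(exp, 2)' is floordiv/mod, and 'base ** q' under 'q >= 1' makes '^ q.toNat' exact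
def pvSolve (pairs : List (Int × Int)) : Int × Int :=
  match pairs with
  | [] => (1, 1)
  | [p] =>
    let q := PySem.Int.floordiv p.2 2
    let r := PySem.Int.mod p.2 2
    ((if q ≥ 1 then p.1 ^ q.toNat else 1), (if r = 1 then p.1 else 1))
  | a :: b :: t =>
    ((pvSolve ((a :: b :: t).take ((a :: b :: t).length / 2))).1 *
       (pvSolve ((a :: b :: t).drop ((a :: b :: t).length / 2))).1,
     (pvSolve ((a :: b :: t).take ((a :: b :: t).length / 2))).2 *
       (pvSolve ((a :: b :: t).drop ((a :: b :: t).length / 2))).2)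
termination_by pairs.length
decreasing_by
  · simp [List.length_take]; omega
  · simp; omega

def root_result_alt (pf_num_list : List (Int × Int)) : List Int :=
  let st := pvSolve pf_num_list
  [st.1, st.2]

-- ===== PRECONDITION & SPEC =====
def Spec_root_result (pf_num_list : List (Int × Int)) (out : List Int) : Prop := out = root_result_alt pf_num_list
instance (pf_num_list : List (Int × Int)) (out : List Int) : Decidable (Spec_root_result pf_num_list out) := by unfold Spec_root_result; infer_instance

-- ===== CLAIM (what is proved, stated in full; the proofs are below) =====
def Claim_equal_root_result : Prop := ∀ (pf_num_list : List (Int × Int)), Dom_root_result pf_num_list → Spec_root_result pf_num_list (root_result pf_num_list)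

-- ===== LEMMAS AND PROOFS =====
-- the common characterisation: per-pair contributions, multiplied over the list
def pvF (p : Int × Int) : Int := if p.2 ≥ 2 then p.1 ^ (PySem.Int.floordiv p.2 2).toNat else 1
def pvB (p : Int × Int) : Int := if PySem.Int.mod p.2 2 = 1 then p.1 else 1

theorem pvSolve_leaf (p : Int × Int) : pvSolve [p] = (pvF p, pvB p) := by
  have hq : PySem.Int.floordiv p.2 2 ≥ 1 ↔ p.2 ≥ 2 := by
    rw [PySem.Int.floordiv_eq_ediv_of_pos (by omega)]; omega
  simp only [pvSolve, pvF, pvB, hq]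

theorem pvSolve_eq (l : List (Int × Int)) :
    pvSolve l = ((l.map pvF).prod, (l.map pvB).prod) := by
  induction l using pvSolve.induct with
  | case1 => simp [pvSolve]
  | case2 p => simpa using pvSolve_leaf p
  | case3 a b t ih1 ih2 =>
    rw [pvSolve, ih1, ih2]
    rw [List.map_take, List.map_take, List.map_drop, List.map_drop,
        List.prod_take_mul_prod_drop, List.prod_take_mul_prod_drop]

theorem pvFoldA_eq (l : List (Int × Int)) (f0 b0 : Int) :
    l.foldl pvStepA (f0, b0) = (f0 * (l.map pvF).prod, b0 * (l.map pvB).prod) := by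
  induction l generalizing f0 b0 with
  | nil => simp
  | cons a t ih =>
    simp only [List.foldl_cons, pvStepA, List.map_cons, List.prod_cons]
    rw [ih]
    unfold pvF pvB
    by_cases hm : PySem.Int.mod a.2 2 = 1 <;> by_cases h2 : a.2 ≥ 2 <;>
      simp [*, mul_assoc]

-- ===== VERDICT (by name: the statement is the Claim_ definition above) =====
theorem root_result_spec : Claim_equal_root_result := by
  intro l _
  show root_result l = root_result_alt l
  unfold root_result root_result_alt
  rw [show (List.foldl (fun acc i => pvStepA acc (PySem.List.pyGetD l i (0, 0))) (1, 1)
        (PySem.List.pyRange 0 (PySem.List.len l) 1))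
      = List.foldl pvStepA (1, 1)
          ((PySem.List.pyRange 0 (PySem.List.len l) 1).map
            (fun j => PySem.List.pyGetD l j (0, 0)))
      from (List.foldl_map ..).symm]
  rw [PySem.List.map_pyGetD_pyRange_zero, pvFoldA_eq, pvSolve_eq]
  simp
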